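-- pv_equiv track=rewrite | github.com/jfoliveiraramos/leetcode | python3/1233.py | subfolder
-- ===== SOURCE A (Python) =====
-- def subfolder(folder: str, dirs: set) -> bool:
--
--     i = 0
--     while True:
--         i = folder.find('/', i + 1)
--         if i == -1:
--             return False
--
--         if folder[0: i] in dirs:
--             return True
-- ===== SOURCE B (Python) =====
-- def subfolder(folder: str, dirs: set) -> bool:
--     prefix = ""
--     for ch in folder:
--         if ch == '/' and prefix and prefix in dirs:
--             return True
--         prefix += ch
--     return False
-- ===== Notes on version B (the rewrite author's own statement) =====
-- stated objective: alternative
-- what changed: B replaces A's repeated str.find('/', i+1) jumps with folder[0:i] re-slicing by a single character-by-character pass that accumulates the running prefix and tests it when it hits a '/'.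
import Mathlib
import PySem

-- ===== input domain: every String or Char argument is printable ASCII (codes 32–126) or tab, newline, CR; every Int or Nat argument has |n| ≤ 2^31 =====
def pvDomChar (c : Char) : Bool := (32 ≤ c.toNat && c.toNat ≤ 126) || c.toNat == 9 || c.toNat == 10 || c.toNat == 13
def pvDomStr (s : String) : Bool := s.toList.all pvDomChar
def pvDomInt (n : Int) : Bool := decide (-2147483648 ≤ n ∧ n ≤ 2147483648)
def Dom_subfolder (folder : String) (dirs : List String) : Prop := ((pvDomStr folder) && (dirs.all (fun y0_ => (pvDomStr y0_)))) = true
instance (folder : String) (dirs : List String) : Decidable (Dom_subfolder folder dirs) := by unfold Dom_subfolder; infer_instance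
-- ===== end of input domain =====

-- B replaces A's find('/')-and-reslice scan with a single char-by-char pass that
-- accumulates the running prefix (objective: alternative decomposition, same cost).


-- ===== PORT A =====
-- A's while-True loop: i = folder.find('/', i + 1); return False at -1, True when
-- folder[0:i] is in dirs.  The loop runs at most (number of '/' in folder) + 1 times,
-- so fuel = length + 1 is a pure totality guard (proved sufficient below).
def subfolderLoopA (s : List Char) (dirs : List String) (i : Int) : Nat → Bool
  | 0 => false
  | fuel + 1 =>
    let j := PySem.Chars.findFrom s ['/'] (i + 1) none
    if j = -1 then false
    else if dirs.contains (String.ofList (PySem.Chars.slice s (some 0) (some j))) then true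
    else subfolderLoopA s dirs j fuel

def subfolder (folder : String) (dirs : List String) : Bool :=
  subfolderLoopA folder.toList dirs 0 (folder.toList.length + 1)

-- ===== PORT B =====
-- B's for-loop over the characters, carrying the accumulated prefix.
def subfolderLoopB (dirs : List String) (pre : List Char) : List Char → Bool
  | [] => false
  | c :: rest =>
    if c == '/' && !pre.isEmpty && dirs.contains (String.ofList pre) then true
    else subfolderLoopB dirs (pre ++ [c]) rest

def subfolder_alt (folder : String) (dirs : List String) : Bool :=
  subfolderLoopB dirs [] folder.toList

-- ===== PRECONDITION & SPEC =====
def Spec_subfolder (folder : String) (dirs : List String) (out : Bool) : Prop := out = subfolder_alt folder dirs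
instance (folder : String) (dirs : List String) (out : Bool) : Decidable (Spec_subfolder folder dirs out) := by unfold Spec_subfolder; infer_instance

-- ===== CLAIM (what is proved, stated in full; the proofs are below) =====
def Claim_equal_subfolder : Prop := ∀ (folder : String) (dirs : List String), Dom_subfolder folder dirs → Spec_subfolder folder dirs (subfolder folder dirs)

-- ===== LEMMAS AND PROOFS =====

-- B's loop from a split point: positions with no '/' are skipped.
lemma loopB_no_slash (dirs : List String) (l : List Char) (h : '/' ∉ l) :
    ∀ pre, subfolderLoopB dirs pre l = false := by
  induction l with
  | nil => intro pre; rfl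
  | cons c rest ih =>
    intro pre
    have hc : c ≠ '/' := fun hc => h (hc ▸ List.mem_cons_self)
    have hc' : (c == '/') = false := by simpa using fun hcc => hc hcc
    simp [subfolderLoopB, hc', ih (fun hm => h (List.mem_cons_of_mem _ hm))]

-- skipping positions m..j-1 that hold no '/'
lemma loopB_skip (dirs : List String) (s : List Char) :
    ∀ d m, m + d ≤ s.length →
    (∀ i, m ≤ i → i < m + d → s.getD i ' ' ≠ '/') →
    subfolderLoopB dirs (s.take m) (s.drop m) =
      subfolderLoopB dirs (s.take (m + d)) (s.drop (m + d)) := by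
  intro d
  induction d with
  | zero => intro m _ _; rfl
  | succ d ih =>
    intro m hle hno
    have hm : m < s.length := by omega
    have hdrop : s.drop m = s[m] :: s.drop (m + 1) := List.drop_eq_getElem_cons hm
    have hcm : s[m] ≠ '/' := by
      have := hno m le_rfl (by omega)
      simpa [List.getD_eq_getElem?_getD, hm] using this
    have hcm' : (s[m] == '/') = false := by simpa using fun hcc => hcm hcc
    have htake : s.take m ++ [s[m]] = s.take (m + 1) := List.take_append_getElem hm
    calc subfolderLoopB dirs (s.take m) (s.drop m)
        = subfolderLoopB dirs (s.take (m + 1)) (s.drop (m + 1)) := by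
          rw [hdrop]; simp [subfolderLoopB, hcm', htake]
      _ = subfolderLoopB dirs (s.take (m + 1 + d)) (s.drop (m + 1 + d)) := by
          apply ih (m + 1) (by omega)
          intro i h1 h2; exact hno i (by omega) (by omega)
      _ = subfolderLoopB dirs (s.take (m + (d + 1))) (s.drop (m + (d + 1))) := by
          norm_num [Nat.add_comm, Nat.add_left_comm]

-- the main loop correspondence, by induction on A's fuel
lemma loopAB (s : List Char) (dirs : List String) :
    ∀ fuel m, 1 ≤ m → m ≤ s.length →
    (s.drop m).count '/' < fuel →
    subfolderLoopA s dirs ((m : Int) - 1) fuel =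
      subfolderLoopB dirs (s.take m) (s.drop m) := by
  intro fuel
  induction fuel with
  | zero => intro m _ _ h; omega
  | succ fuel ih =>
    intro m hm1 hmle hcnt
    have hstart : ((m : Int) - 1) + 1 = (m : Nat) := by ring
    by_cases hneg : PySem.Chars.findFrom s ['/'] (m : Int) none = -1
    · -- no further slash: both sides are false
      have hno : ¬ ['/'] <:+: s.drop m :=
        (PySem.Chars.findFrom_natCast_eq_neg_one_iff s ['/'] m hmle).mp hneg
      have hnomem : '/' ∉ s.drop m := fun hmem => hno ((List.singleton_infix_iff _ _).mpr hmem)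
      simp only [subfolderLoopA, hstart, hneg]
      exact (loopB_no_slash dirs _ hnomem _).symm
    · obtain ⟨hge, hpre, hmin⟩ := PySem.Chars.findFrom_natCast_spec s ['/'] m hmle hneg
      set r := PySem.Chars.findFrom s ['/'] (m : Int) none with hr
      have hr0 : 0 ≤ r := le_trans (by exact_mod_cast Nat.zero_le m) hge
      set j := r.toNat with hj
      have hrj : r = (j : Int) := by omega
      have hmj : m ≤ j := by omega
      -- s[j] = '/', j < length
      obtain ⟨t, ht⟩ := hpre
      have hjlt : j < s.length := by
        by_contra h
        have : s.drop j = [] := List.drop_eq_nil_of_le (by omega)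
        rw [this] at ht; simp at ht
      have hdropj : s.drop j = s[j] :: s.drop (j + 1) := List.drop_eq_getElem_cons hjlt
      have hsj : s[j] = '/' := by
        rw [hdropj] at ht; exact (List.cons.injEq .. ▸ ht).1.symm
      -- skip from m to j on the B side
      have hskip : subfolderLoopB dirs (s.take m) (s.drop m) =
          subfolderLoopB dirs (s.take j) (s.drop j) := by
        have := loopB_skip dirs s (j - m) m (by omega) ?_
        · simpa [Nat.add_sub_cancel' hmj] using this
        · intro i h1 h2 hc
          have hilt : i < s.length := by omega
          have : ['/'] <+: s.drop i := by
            rw [List.drop_eq_getElem_cons hilt]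
            have : s[i] = '/' := by
              simpa [List.getD_eq_getElem?_getD, hilt] using hc
            exact ⟨s.drop (i + 1), by simp [this]⟩
          exact hmin i h1 (by omega) this
      have htakej : s.take j ≠ [] := by
        have : (s.take j).length = j := by simp [min_eq_left (le_of_lt hjlt)]
        intro h; rw [h] at this; simp at this; omega
      have hslice : PySem.Chars.slice s (some 0) (some r) = s.take j := by
        rw [PySem.Chars.slice_eq_listSlice, PySem.List.slice_zero_start,
          PySem.List.slice_to s hr0]
      -- unfold one step of A and of B at position j
      have htake1 : s.take j ++ [s[j]] = s.take (j + 1) := List.take_append_getElem hjlt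
      have hcond : (s[j] == '/' && !(s.take j).isEmpty &&
          dirs.contains (String.ofList (s.take j))) = dirs.contains (String.ofList (s.take j)) := by
        simp [hsj, htakej]
      simp only [subfolderLoopA, hstart, ← hr, if_neg hneg, hslice]
      rw [hskip, hdropj]
      simp only [subfolderLoopB, hcond, htake1]
      by_cases hmem : dirs.contains (String.ofList (s.take j)) = true
      · have hmm : String.ofList (s.take j) ∈ dirs := by simpa using hmem
        simp [hmm]
      · have hmem' : dirs.contains (String.ofList (s.take j)) = false := by simpa using hmem
        have hcnt' : (s.drop (j + 1)).count '/' < fuel := by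
          have hsplit : s.drop m = (s.drop m).take (j - m) ++ s.drop j := by
            have : s.drop j = (s.drop m).drop (j - m) := by
              rw [List.drop_drop]; congr 1; omega
            rw [this, List.take_append_drop]
          have hco : (s.drop m).count '/' =
              ((s.drop m).take (j - m)).count '/' + (s.drop j).count '/' := by
            conv_lhs => rw [hsplit]
            exact List.count_append ..
          rw [hdropj] at hco
          simp [hsj] at hco
          omega
        have hih := ih (j + 1) (by omega) (by omega) hcnt'
        rw [show ((((j : Nat) + 1 : Nat) : Int) - 1) = r by rw [hrj]; push_cast; ring] at hih
        rw [hih, hmem']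

lemma subfolder_eq (folder : String) (dirs : List String) :
    subfolder folder dirs = subfolder_alt folder dirs := by
  unfold subfolder subfolder_alt
  cases hs : folder.toList with
  | nil =>
    have hf : PySem.Chars.findFrom ([] : List Char) ['/'] 1 none = -1 := by decide
    simp [subfolderLoopA, subfolderLoopB, hf]
  | cons c rest =>
    set s := c :: rest with hsdef
    have h1 : 1 ≤ s.length := by simp [hsdef]
    have hcnt : (s.drop 1).count '/' < s.length + 1 := by
      have := List.count_le_length (l := s.drop 1) (a := '/')
      simp at this ⊢; omega
    have hmain := loopAB s dirs (s.length + 1) 1 le_rfl h1 hcnt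
    rw [show (((1 : Nat) : Int) - 1) = 0 by norm_num] at hmain
    rw [hmain]
    -- B from position 0 to position 1: the guard never fires on the empty prefix
    cases hc : (c == '/') <;> simp [subfolderLoopB, hc, hsdef]

-- ===== VERDICT (by name: the statement is the Claim_ definition above) =====
theorem subfolder_spec : Claim_equal_subfolder := by
  intro folder dirs _
  unfold Spec_subfolder
  exact subfolder_eq folder dirs
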